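-- pv_equiv track=rewrite | github.com/John-Howard/PythonSpeedEditor | sdrpp_bridge.py | main_leds_from_names
-- ===== SOURCE A (Python) =====
-- MAIN_LED: dict[str, tuple[int, int]] = {
--     "CLOSE_UP":    (0, 0),
--     "CUT":         (0, 1),
--     "DIS":         (0, 2),
--     "SMTH_CUT":    (0, 3),
--     "TRANS":       (0, 4),
--     "SNAP":        (0, 5),
--     "CAM7":        (0, 6),
--     "CAM8":        (0, 7),
--     "CAM9":        (1, 0),
--     "LIVE_OWR":    (1, 1),
--     "CAM4":        (1, 2),
--     "CAM5":        (1, 3),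
--     "CAM6":        (1, 4),
--     "VIDEO_ONLY":  (1, 5),
--     "CAM1":        (1, 6),
--     "CAM2":        (1, 7),
--     "CAM3":        (2, 0),
--     "AUDIO_ONLY":  (2, 1),
-- }
--
-- def main_leds_from_names(names: set[str]) -> tuple[int, int, int, int]:
--     """Convert a set of main LED names to the 4-byte bitmask for report 0x02."""
--     b = [0, 0, 0, 0]
--     for name in names:
--         pos = MAIN_LED.get(name)
--         if pos:
--             byte_idx, bit = pos
--             b[byte_idx] |= 1 << bit
--     return b[0], b[1], b[2], b[3]
-- ===== SOURCE B (Python) =====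
-- # B: Horner-style per-byte synthesis — each output byte is built by walking the
-- # fixed bit-order name row from MSB to LSB, doubling and adding a membership
-- # indicator; no dict lookups, no shifts/ORs, and byte 3 is the constant 0.
-- ROW0 = ["CLOSE_UP", "CUT", "DIS", "SMTH_CUT", "TRANS", "SNAP", "CAM7", "CAM8"]
-- ROW1 = ["CAM9", "LIVE_OWR", "CAM4", "CAM5", "CAM6", "VIDEO_ONLY", "CAM1", "CAM2"]
-- ROW2 = ["CAM3", "AUDIO_ONLY"]
--
-- def main_leds_from_names(names):
--     """Convert a set of main LED names to the 4-byte bitmask for report 0x02."""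
--     def byte(row):
--         v = 0
--         for name in reversed(row):
--             v = v * 2 + (1 if name in names else 0)
--         return v
--     return (byte(ROW0), byte(ROW1), byte(ROW2), 0)
-- ===== Notes on version B (the rewrite author's own statement) =====
-- stated objective: faster
-- what changed: B abandons the dict/bitmask mechanics entirely: it builds each output byte by a Horner walk over a fixed bit-ordered name row (MSB to LSB, v = v*2 + membership indicator), with no table lookup, no shifting and no OR, and byte 3 is the literal constant 0; A instead loops over the input names, looks each up in MAIN_LED and ORs 1<<bit into a 4-byte list.
import Mathlib
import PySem

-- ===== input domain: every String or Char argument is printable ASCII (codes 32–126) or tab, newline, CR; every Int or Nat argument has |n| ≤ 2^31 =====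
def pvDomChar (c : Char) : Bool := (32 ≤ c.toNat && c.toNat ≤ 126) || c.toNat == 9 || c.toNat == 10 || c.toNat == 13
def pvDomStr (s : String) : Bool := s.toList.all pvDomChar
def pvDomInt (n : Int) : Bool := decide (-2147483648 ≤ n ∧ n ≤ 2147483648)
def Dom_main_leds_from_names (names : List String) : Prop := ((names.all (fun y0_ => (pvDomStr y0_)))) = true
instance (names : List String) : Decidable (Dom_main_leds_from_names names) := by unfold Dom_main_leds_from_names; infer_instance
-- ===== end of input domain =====

-- B builds each output byte by a Horner walk over a fixed bit-ordered name row
-- (v = v*2 + membership indicator), with no dict lookup, no shift and no OR;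
-- a structural alternative to A's lookup-and-OR loop over the input names.

-- ===== PORT A =====
-- the module constant MAIN_LED (as in the Python module)
def MAIN_LED : PySem.Dict String (Int × Int) := PySem.Dict.mk [
  ("CLOSE_UP",   (0, 0)),
  ("CUT",        (0, 1)),
  ("DIS",        (0, 2)),
  ("SMTH_CUT",   (0, 3)),
  ("TRANS",      (0, 4)),
  ("SNAP",       (0, 5)),
  ("CAM7",       (0, 6)),
  ("CAM8",       (0, 7)),
  ("CAM9",       (1, 0)),
  ("LIVE_OWR",   (1, 1)),
  ("CAM4",       (1, 2)),
  ("CAM5",       (1, 3)),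
  ("CAM6",       (1, 4)),
  ("VIDEO_ONLY", (1, 5)),
  ("CAM1",       (1, 6)),
  ("CAM2",       (1, 7)),
  ("CAM3",       (2, 0)),
  ("AUDIO_ONLY", (2, 1))]

-- `b[byte_idx] |= 1 << bit` on the 4-element list b, modelled as a 4-tuple.
-- `bit.toNat` is exact here: every bit in MAIN_LED is a nonnegative literal (0..7),
-- and every byte_idx is 0..2, always in range of the 4-element list.
def pySetBit (b : Int × Int × Int × Int) (i : Int) (bit : Int) : Int × Int × Int × Int :=
  if i = 0 then (PySem.Int.bor b.1 ((1 : Int) <<< bit.toNat), b.2.1, b.2.2.1, b.2.2.2)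
  else if i = 1 then (b.1, PySem.Int.bor b.2.1 ((1 : Int) <<< bit.toNat), b.2.2.1, b.2.2.2)
  else if i = 2 then (b.1, b.2.1, PySem.Int.bor b.2.2.1 ((1 : Int) <<< bit.toNat), b.2.2.2)
  else if i = 3 then (b.1, b.2.1, b.2.2.1, PySem.Int.bor b.2.2.2 ((1 : Int) <<< bit.toNat))
  else b

-- loop body of A: pos = MAIN_LED.get(name); if pos: b[byte_idx] |= 1 << bit
-- (`if pos` is truthy: pos is None or a nonempty tuple)
def ledStepA (b : Int × Int × Int × Int) (name : String) : Int × Int × Int × Int :=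
  match PySem.Dict.get? MAIN_LED name with
  | some pos => pySetBit b pos.1 pos.2
  | none => b

def main_leds_from_names (names : List String) : Int × Int × Int × Int :=
  names.foldl ledStepA (0, 0, 0, 0)

-- ===== PORT B =====
-- the module constants ROW0/ROW1/ROW2 of Source B: names of each byte in bit order
def ROW0 : List String := ["CLOSE_UP", "CUT", "DIS", "SMTH_CUT", "TRANS", "SNAP", "CAM7", "CAM8"]
def ROW1 : List String := ["CAM9", "LIVE_OWR", "CAM4", "CAM5", "CAM6", "VIDEO_ONLY", "CAM1", "CAM2"]
def ROW2 : List String := ["CAM3", "AUDIO_ONLY"]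

-- inner helper `byte(row)`: v = 0; for name in reversed(row): v = v*2 + (1 if name in names else 0)
def hornerByte (names : List String) (row : List String) : Int :=
  row.reverse.foldl (fun v name => v * 2 + (if names.contains name then 1 else 0)) 0

def main_leds_from_names_alt (names : List String) : Int × Int × Int × Int :=
  (hornerByte names ROW0, hornerByte names ROW1, hornerByte names ROW2, 0)

-- ===== PRECONDITION & SPEC =====
def Spec_main_leds_from_names (names : List String) (out : Int × Int × Int × Int) : Prop := out = main_leds_from_names_alt names
instance (names : List String) (out : Int × Int × Int × Int) : Decidable (Spec_main_leds_from_names names out) := by unfold Spec_main_leds_from_names; infer_instance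

-- ===== CLAIM (what is proved, stated in full; the proofs are below) =====
def Claim_equal_main_leds_from_names : Prop := ∀ (names : List String), Dom_main_leds_from_names names → Spec_main_leds_from_names names (main_leds_from_names names)

-- ===== LEMMAS AND PROOFS =====

-- componentwise `|` of two 4-tuples; A's loop body is "OR a fixed mask in"
def pvMerge (x y : Int × Int × Int × Int) : Int × Int × Int × Int :=
  (PySem.Int.bor x.1 y.1, PySem.Int.bor x.2.1 y.2.1,
   PySem.Int.bor x.2.2.1 y.2.2.1, PySem.Int.bor x.2.2.2 y.2.2.2)

-- all four components nonnegative (true of every state A's loop reaches)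
def pvNN (b : Int × Int × Int × Int) : Prop := 0 ≤ b.1 ∧ 0 ≤ b.2.1 ∧ 0 ≤ b.2.2.1 ∧ 0 ≤ b.2.2.2

lemma pv_bor_nonneg {a b : Int} (ha : 0 ≤ a) (hb : 0 ≤ b) : 0 ≤ PySem.Int.bor a b := by
  rw [PySem.Int.bor_of_nonneg ha hb]; exact Int.natCast_nonneg _

lemma pv_bor_assoc {a b c : Int} (ha : 0 ≤ a) (hb : 0 ≤ b) (hc : 0 ≤ c) :
    PySem.Int.bor (PySem.Int.bor a b) c = PySem.Int.bor a (PySem.Int.bor b c) := by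
  rw [PySem.Int.bor_of_nonneg ha hb, PySem.Int.bor_of_nonneg hb hc,
    PySem.Int.bor_of_nonneg (Int.natCast_nonneg _) hc, PySem.Int.bor_of_nonneg ha (Int.natCast_nonneg _)]
  simp [Int.toNat_natCast, Nat.lor_assoc]

lemma pv_shift_nonneg (n : Nat) : (0 : Int) ≤ (1 : Int) <<< n := by
  rw [Int.shiftLeft_eq]; positivity

lemma pvNN_zero : pvNN (0, 0, 0, 0) := ⟨le_refl 0, le_refl 0, le_refl 0, le_refl 0⟩

lemma pvNN_merge {x y : Int × Int × Int × Int} (hx : pvNN x) (hy : pvNN y) : pvNN (pvMerge x y) :=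
  ⟨pv_bor_nonneg hx.1 hy.1, pv_bor_nonneg hx.2.1 hy.2.1,
   pv_bor_nonneg hx.2.2.1 hy.2.2.1, pv_bor_nonneg hx.2.2.2 hy.2.2.2⟩

lemma pvNN_setBit {b : Int × Int × Int × Int} (hb : pvNN b) (i bit : Int) : pvNN (pySetBit b i bit) := by
  obtain ⟨h1, h2, h3, h4⟩ := hb
  unfold pySetBit
  split_ifs <;>
    exact ⟨by first | exact pv_bor_nonneg ‹_› (pv_shift_nonneg _) | assumption,
           by first | exact pv_bor_nonneg ‹_› (pv_shift_nonneg _) | assumption,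
           by first | exact pv_bor_nonneg ‹_› (pv_shift_nonneg _) | assumption,
           by first | exact pv_bor_nonneg ‹_› (pv_shift_nonneg _) | assumption⟩

lemma pv_zero_bor (a : Int) : PySem.Int.bor 0 a = a := by
  rw [PySem.Int.bor_comm]; exact PySem.Int.bor_zero a

lemma pv_merge_zero (b : Int × Int × Int × Int) : pvMerge b (0, 0, 0, 0) = b := by
  simp [pvMerge, PySem.Int.bor_zero]

lemma pv_merge_assoc {x y z : Int × Int × Int × Int} (hx : pvNN x) (hy : pvNN y) (hz : pvNN z) :
    pvMerge (pvMerge x y) z = pvMerge x (pvMerge y z) := by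
  simp only [pvMerge]
  exact Prod.ext (pv_bor_assoc hx.1 hy.1 hz.1) (Prod.ext (pv_bor_assoc hx.2.1 hy.2.1 hz.2.1)
    (Prod.ext (pv_bor_assoc hx.2.2.1 hy.2.2.1 hz.2.2.1) (pv_bor_assoc hx.2.2.2 hy.2.2.2 hz.2.2.2)))

lemma pv_setBit_merge (b : Int × Int × Int × Int) (i bit : Int) :
    pySetBit b i bit = pvMerge b (pySetBit (0, 0, 0, 0) i bit) := by
  unfold pySetBit
  split_ifs <;> simp [pvMerge, pv_zero_bor, PySem.Int.bor_zero]

-- A's loop body splits off its mask: f b t = b | (f 0 t)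
lemma pv_stepA_merge (b : Int × Int × Int × Int) (name : String) :
    ledStepA b name = pvMerge b (ledStepA (0, 0, 0, 0) name) := by
  unfold ledStepA
  cases PySem.Dict.get? MAIN_LED name with
  | none => exact (pv_merge_zero b).symm
  | some pos => exact pv_setBit_merge b pos.1 pos.2

lemma pvNN_stepA (name : String) : pvNN (ledStepA (0, 0, 0, 0) name) := by
  unfold ledStepA
  cases PySem.Dict.get? MAIN_LED name with
  | none => exact pvNN_zero
  | some pos => exact pvNN_setBit pvNN_zero pos.1 pos.2

-- accumulator factoring for A's loop
lemma pvNN_foldl :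
    ∀ (l : List String) (b : Int × Int × Int × Int), pvNN b → pvNN (l.foldl ledStepA b) := by
  intro l
  induction l with
  | nil => intro b hb; exact hb
  | cons t l ih =>
    intro b hb
    simp only [List.foldl_cons]
    exact ih _ (by rw [pv_stepA_merge]; exact pvNN_merge hb (pvNN_stepA t))

lemma pv_foldl_merge :
    ∀ (l : List String) (b : Int × Int × Int × Int), pvNN b →
      l.foldl ledStepA b = pvMerge b (l.foldl ledStepA (0, 0, 0, 0)) := by
  intro l
  induction l with
  | nil => intro b hb; exact (pv_merge_zero b).symm
  | cons t l ih =>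
    intro b hb
    simp only [List.foldl_cons]
    have hbt : pvNN (ledStepA b t) := by rw [pv_stepA_merge]; exact pvNN_merge hb (pvNN_stepA t)
    have h0t := pvNN_stepA t
    have hX : pvNN (l.foldl ledStepA (0, 0, 0, 0)) := pvNN_foldl l _ pvNN_zero
    rw [ih (ledStepA b t) hbt, ih (ledStepA (0, 0, 0, 0) t) h0t, pv_stepA_merge b t,
      pv_merge_assoc hb h0t hX]

-- hornerByte as a foldr over the row in bit order (bit 0 has weight 1)
lemma pv_horner_foldr (names row : List String) :
    hornerByte names row =
      row.foldr (fun name v => v * 2 + (if names.contains name then 1 else 0)) 0 := by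
  unfold hornerByte
  rw [List.foldl_reverse]

lemma pv_foldr_nonneg (ns : List String) :
    ∀ row : List String,
      (0 : Int) ≤ row.foldr (fun name v => v * 2 + (if ns.contains name then 1 else 0)) 0 := by
  intro row
  induction row with
  | nil => simp
  | cons n r ih =>
    simp only [List.foldr_cons]
    split_ifs <;> omega

-- bit-step on Nat: OR of one doubling step
lemma pv_nat_lor_step (m n : Nat) (i j : Bool) :
    (2 * m + i.toNat) ||| (2 * n + j.toNat) = 2 * (m ||| n) + (i || j).toNat := by
  simpa [Nat.bit_val] using Nat.lor_bit i m j n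

-- bit-step: OR distributes over one Horner step
lemma pv_bor_horner_step {a b : Int} (ha : 0 ≤ a) (hb : 0 ≤ b) (i j : Bool) :
    PySem.Int.bor (a * 2 + (if i then 1 else 0)) (b * 2 + (if j then 1 else 0)) =
      (PySem.Int.bor a b) * 2 + (if i || j then 1 else 0) := by
  obtain ⟨m, rfl⟩ : ∃ m : Nat, a = (m : Int) := ⟨a.toNat, (Int.toNat_of_nonneg ha).symm⟩
  obtain ⟨n, rfl⟩ : ∃ n : Nat, b = (n : Int) := ⟨b.toNat, (Int.toNat_of_nonneg hb).symm⟩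
  have h1 : ((m : Int) * 2 + (if i then 1 else 0)) = ((2 * m + i.toNat : Nat) : Int) := by
    cases i <;> push_cast <;> simp <;> ring
  have h2 : ((n : Int) * 2 + (if j then 1 else 0)) = ((2 * n + j.toNat : Nat) : Int) := by
    cases j <;> push_cast <;> simp <;> ring
  rw [h1, h2, PySem.Int.bor_natCast, PySem.Int.bor_natCast, pv_nat_lor_step]
  cases (i || j) <;> push_cast <;> simp <;> ring

-- OR of two Horner bytes is the Horner byte of the concatenated name lists
lemma pv_horner_or (ns1 ns2 : List String) :
    ∀ row, PySem.Int.bor (hornerByte ns1 row) (hornerByte ns2 row) = hornerByte (ns1 ++ ns2) row := by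
  intro row
  simp only [pv_horner_foldr]
  induction row with
  | nil => simp [PySem.Int.bor_zero]
  | cons n r ih =>
    simp only [List.foldr_cons]
    rw [pv_bor_horner_step (pv_foldr_nonneg ns1 r) (pv_foldr_nonneg ns2 r), ih]
    congr 1
    simp

-- A's per-name mask equals B's Horner bytes for the singleton name list
lemma pv_single (x : String) :
    ledStepA (0, 0, 0, 0) x = (hornerByte [x] ROW0, hornerByte [x] ROW1, hornerByte [x] ROW2, 0) := by
  by_cases hx : x ∈ ["CLOSE_UP", "CUT", "DIS", "SMTH_CUT", "TRANS", "SNAP", "CAM7", "CAM8",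
      "CAM9", "LIVE_OWR", "CAM4", "CAM5", "CAM6", "VIDEO_ONLY", "CAM1", "CAM2", "CAM3", "AUDIO_ONLY"]
  · fin_cases hx <;> decide
  · simp only [List.mem_cons, List.not_mem_nil, or_false, not_or] at hx
    obtain ⟨n1, n2, n3, n4, n5, n6, n7, n8, n9, n10, n11, n12, n13, n14, n15, n16, n17, n18⟩ := hx
    unfold ledStepA MAIN_LED
    simp only [PySem.Dict.get?_mk_cons, beq_iff_eq]
    rw [if_neg (Ne.symm n1), if_neg (Ne.symm n2), if_neg (Ne.symm n3), if_neg (Ne.symm n4),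
      if_neg (Ne.symm n5), if_neg (Ne.symm n6), if_neg (Ne.symm n7), if_neg (Ne.symm n8),
      if_neg (Ne.symm n9), if_neg (Ne.symm n10), if_neg (Ne.symm n11), if_neg (Ne.symm n12),
      if_neg (Ne.symm n13), if_neg (Ne.symm n14), if_neg (Ne.symm n15), if_neg (Ne.symm n16),
      if_neg (Ne.symm n17), if_neg (Ne.symm n18)]
    simp [hornerByte, ROW0, ROW1, ROW2, PySem.Dict.get?,
      Ne.symm n1, Ne.symm n2, Ne.symm n3, Ne.symm n4, Ne.symm n5, Ne.symm n6, Ne.symm n7,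
      Ne.symm n8, Ne.symm n9, Ne.symm n10, Ne.symm n11, Ne.symm n12, Ne.symm n13, Ne.symm n14,
      Ne.symm n15, Ne.symm n16, Ne.symm n17, Ne.symm n18]

lemma pv_main_eq (names : List String) :
    main_leds_from_names names = main_leds_from_names_alt names := by
  induction names with
  | nil => decide
  | cons x rest ih =>
    have hA : main_leds_from_names (x :: rest) =
        pvMerge (ledStepA (0, 0, 0, 0) x) (main_leds_from_names rest) := by
      unfold main_leds_from_names
      simp only [List.foldl_cons]
      exact pv_foldl_merge rest _ (pvNN_stepA x)
    rw [hA, ih, pv_single]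
    unfold main_leds_from_names_alt pvMerge
    simp only
    rw [pv_horner_or, pv_horner_or, pv_horner_or]
    have : PySem.Int.bor (0 : Int) 0 = 0 := PySem.Int.bor_zero 0
    rw [this]
    rfl

-- ===== VERDICT (by name: the statement is the Claim_ definition above) =====
theorem main_leds_from_names_spec : Claim_equal_main_leds_from_names := by
  intro names _
  unfold Spec_main_leds_from_names
  exact pv_main_eq names
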